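-- pv_equiv track=rewrite | github.com/Yaminyam/Algorithm | devday/2022-first-half/B.py | solution
-- ===== SOURCE A (Python) =====
-- def solution(s):
--     answer = []
--     b = ''
--     chk = 0
--     temp = ""
--     ss = []
--     for c in s:
--         if b != c and chk == 1:
--             ss += [temp[:-1]]
--             chk = 0
--             temp = ""
--             temp += c
--         elif b != c:
--             temp += c
--         elif b == c:
--             chk = 1
--         b = c
--     if chk == 1:
--         ss += [temp[:-1]]
--         temp = ""
--     ss += [temp]
--     n = len(ss)
--     ans = []
--     ans += [ss[0]]
--     for i in range(1, n-1):
--         if ss[i] != "":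
--             ans += [ss[i]]
--     if n > 1:
--         ans += [ss[n-1]]
--     return ans
-- ===== SOURCE B (Python) =====
-- def solution(s):
--     # Per-run traversal: split s into maximal runs of equal characters;
--     # a run of length >= 2 is a separator, a run of length 1 joins the current token.
--     runs = []
--     i = 0
--     n = len(s)
--     while i < n:
--         j = i + 1
--         while j < n and s[j] == s[i]:
--             j += 1
--         runs.append((s[i], j - i))
--         i = j
--     ss = []
--     tok = ""
--     for ch, k in runs:
--         if k >= 2:
--             ss.append(tok)
--             tok = ""
--         else:
--             tok += ch
--     ss.append(tok)
--     if len(ss) == 1: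
--         return ss
--     return [ss[0]] + [t for t in ss[1:-1] if t] + [ss[-1]]
-- ===== Notes on version B (the rewrite author's own statement) =====
-- stated objective: alternative
-- what changed: Replaces A's per-character flag state machine (b/chk/temp) with a run-length decomposition: the string is first split into maximal runs of equal characters, then runs of length >= 2 act as separators and singleton runs extend the current token; the final keep-nonempty-middles step is written with slicing/filtering instead of an index loop.
import Mathlib
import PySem

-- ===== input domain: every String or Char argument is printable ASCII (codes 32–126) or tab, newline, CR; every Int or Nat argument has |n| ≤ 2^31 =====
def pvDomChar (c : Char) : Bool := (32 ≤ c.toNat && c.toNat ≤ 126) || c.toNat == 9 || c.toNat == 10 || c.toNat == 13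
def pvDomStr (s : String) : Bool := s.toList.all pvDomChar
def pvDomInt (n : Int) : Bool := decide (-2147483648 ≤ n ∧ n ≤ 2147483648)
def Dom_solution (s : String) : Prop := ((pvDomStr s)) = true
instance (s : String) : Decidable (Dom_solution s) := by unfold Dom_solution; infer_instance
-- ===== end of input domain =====

-- B replaces A's per-character flag state machine by a per-run (run-length) traversal; objective: alternative decomposition, same cost.

-- ===== PORT A =====
-- A's for-loop over the characters; state (b, chk, temp, ss); b = '' is modelled as `none`
-- (in Python `'' != c` holds for every 1-char string c, matching the `none ≠ some c` branch).
def loopA : List Char → Option Char → Bool → List Char → List (List Char) →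
    (Bool × List Char × List (List Char))
  | [], _, chk, temp, ss => (chk, temp, ss)
  | c :: cs, b, chk, temp, ss =>
    if b ≠ some c ∧ chk = true then loopA cs (some c) false [c] (ss ++ [temp.dropLast])
    else if b ≠ some c then loopA cs (some c) chk (temp ++ [c]) ss
    else loopA cs (some c) true temp ss

-- the post-loop fix-up `if chk == 1: ss += [temp[:-1]]; temp = ""` followed by `ss += [temp]`
def phase1A (cs : List Char) : List (List Char) :=
  let r := loopA cs none false [] []
  if r.1 then (r.2.2 ++ [r.2.1.dropLast]) ++ [[]] else r.2.2 ++ [r.2.1]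

def solution (s : String) : List String :=
  let ss := phase1A s.toList
  let n : Int := ss.length
  -- ss is never empty (it always ends with `ss += [temp]`), so every index below is
  -- in range and Python's ss[i] never raises; pyGetD's default is unreachable.
  let ans := ([] : List (List Char)) ++ [PySem.List.pyGetD ss 0 []]
  let ans := (PySem.List.pyRange 1 (n - 1) 1).foldl
      (fun ans i => if PySem.List.pyGetD ss i [] ≠ [] then ans ++ [PySem.List.pyGetD ss i []] else ans) ans
  let ans := if n > 1 then ans ++ [PySem.List.pyGetD ss (n - 1) []] else ans
  ans.map String.ofList

-- ===== PORT B =====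
-- the two nested while-loops of Source B: peel off the maximal run of the first character
def runsOf : List Char → List (Char × Nat)
  | [] => []
  | c :: rest =>
    let k := (rest.takeWhile (fun d => d == c)).length + 1
    (c, k) :: runsOf (rest.drop (k - 1))
termination_by cs => cs.length
decreasing_by simp [List.length_drop]

-- the for-loop over the runs: a run of length ≥ 2 separates, a singleton run extends the token
def phase1B (cs : List Char) : List (List Char) :=
  let p := (runsOf cs).foldl
      (fun (p : List (List Char) × List Char) r =>
        if 2 ≤ r.2 then (p.1 ++ [p.2], []) else (p.1, p.2 ++ [r.1])) ([], [])
  p.1 ++ [p.2]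

def solution_alt (s : String) : List String :=
  let ss := phase1B s.toList
  -- ss is never empty, so ss[0] and ss[-1] never raise; pyGetD's default is unreachable.
  (if ss.length == 1 then ss
   else [PySem.List.pyGetD ss 0 []]
        ++ (PySem.List.slice ss (some 1) (some (-1))).filter (fun t => t ≠ [])
        ++ [PySem.List.pyGetD ss (-1) []]).map String.ofList

-- ===== PRECONDITION & SPEC =====
def Spec_solution (s : String) (out : List String) : Prop := out = solution_alt s
instance (s : String) (out : List String) : Decidable (Spec_solution s out) := by unfold Spec_solution; infer_instance

-- ===== CLAIM (what is proved, stated in full; the proofs are below) =====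
def Claim_equal_solution : Prop := ∀ (s : String), Dom_solution s → Spec_solution s (solution s)

-- ===== LEMMAS AND PROOFS =====

-- A's final fix-up applied to a loop result
def finA (r : Bool × List Char × List (List Char)) : List (List Char) :=
  if r.1 then (r.2.2 ++ [r.2.1.dropLast]) ++ [[]] else r.2.2 ++ [r.2.1]

-- B's fold continued from an intermediate state
def finB (cs : List Char) (tok : List Char) (ss : List (List Char)) : List (List Char) :=
  let p := (runsOf cs).foldl
      (fun (p : List (List Char) × List Char) r =>
        if 2 ≤ r.2 then (p.1 ++ [p.2], []) else (p.1, p.2 ++ [r.1])) (ss, tok)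
  p.1 ++ [p.2]

theorem dropWhile_head_not (p : Char → Bool) :
    ∀ (l : List Char) (d : Char) (t : List Char), l.dropWhile p = d :: t → p d = false := by
  intro l
  induction l with
  | nil => intro d t h; simp [List.dropWhile] at h
  | cons a l ih =>
    intro d t h
    by_cases hpa : p a
    · rw [List.dropWhile_cons_of_pos hpa] at h; exact ih d t h
    · rw [List.dropWhile_cons_of_neg hpa] at h
      cases h; simpa using hpa

theorem runsOf_nil : runsOf [] = [] := by rw [runsOf]

theorem runsOf_cons (c : Char) (rest : List Char) :
    runsOf (c :: rest) =
      (c, (rest.takeWhile (fun d => d == c)).length + 1)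
        :: runsOf (rest.drop (rest.takeWhile (fun d => d == c)).length) := by
  rw [runsOf]; simp

theorem phase1A_eq_finA (cs : List Char) : phase1A cs = finA (loopA cs none false [] []) := rfl

theorem phase1B_eq_finB (cs : List Char) : phase1B cs = finB cs [] [] := rfl

-- consuming a run while chk is already set leaves the state unchanged
theorem loopA_replicate_chk (j : ℕ) (c : Char) :
    ∀ (post : List Char) (temp : List Char) (ss : List (List Char)),
    loopA (List.replicate j c ++ post) (some c) true temp ss = loopA post (some c) true temp ss := by
  induction j with
  | zero => intro post temp ss; rfl
  | succ j ih =>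
    intro post temp ss
    simp only [List.replicate_succ, List.cons_append, loopA]
    simp [ih]

-- main invariant: from a run boundary (b differs from the next character), A's machine with
-- chk = 0 and B's run fold produce the same final token list
theorem main_inv : ∀ (n : ℕ) (cs : List Char), cs.length ≤ n →
    ∀ (b : Option Char) (tok : List Char) (ss : List (List Char)),
    (∀ c, cs.head? = some c → b ≠ some c) →
    finA (loopA cs b false tok ss) = finB cs tok ss := by
  intro n
  induction n with
  | zero =>
    intro cs hlen b tok ss _
    have : cs = [] := List.eq_nil_of_length_eq_zero (Nat.le_zero.mp hlen)
    subst this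
    simp [loopA, finA, finB, runsOf_nil]
  | succ n ih =>
    intro cs hlen b tok ss hb
    cases cs with
    | nil => simp [loopA, finA, finB, runsOf_nil]
    | cons c rest =>
      have hbc : b ≠ some c := hb c rfl
      have stepA : loopA (c :: rest) b false tok ss = loopA rest (some c) false (tok ++ [c]) ss := by
        simp [loopA, hbc]
      have hrep : rest.takeWhile (fun d => d == c) =
          List.replicate (rest.takeWhile (fun d => d == c)).length c := by
        apply List.eq_replicate_of_mem
        intro d hd
        have := List.mem_takeWhile_imp hd
        simpa using this
      set m := (rest.takeWhile (fun d => d == c)).length with hm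
      have htd := List.takeWhile_append_dropWhile (p := fun d => d == c) (l := rest)
      have hdropW : rest.drop m = rest.dropWhile (fun d => d == c) := by
        calc rest.drop m
            = (rest.takeWhile (fun d => d == c) ++ rest.dropWhile (fun d => d == c)).drop m := by
              rw [htd]
          _ = rest.dropWhile (fun d => d == c) := by rw [hm, List.drop_left]
      have hsplit : rest = List.replicate m c ++ rest.drop m := by
        rw [hdropW, ← hrep]; exact htd.symm
      have hBcons : finB (c :: rest) tok ss =
          (if 2 ≤ m + 1 then finB (rest.drop m) [] (ss ++ [tok])
           else finB (rest.drop m) (tok ++ [c]) ss) := by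
        simp only [finB, runsOf_cons, ← hm, List.foldl_cons]
        split_ifs with h2 <;> simp
      have hlen' : rest.length ≤ n := by simpa using hlen
      rw [stepA]
      match hmc : m with
      | 0 =>
        have hpost : rest.drop 0 = rest := by simp
        rw [hBcons]
        simp only [hpost]
        rw [if_neg (by omega)]
        apply ih rest hlen' (some c) (tok ++ [c]) ss
        intro e he hce
        have hc : c = e := by injection hce
        cases hre : rest with
        | nil => rw [hre] at he; simp at he
        | cons a t =>
          have ha : a = e := by rw [hre] at he; simpa using he
          have hfalse : (a == c) = false := by
            apply dropWhile_head_not (fun x => x == c) rest a t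
            rw [← hdropW]; simpa [hmc] using hre
          rw [ha, ← hc] at hfalse
          simp at hfalse
      | j + 1 =>
        have hpostlen : (rest.drop (j + 1)).length ≤ n := by
          simp only [List.length_drop]; omega
        conv_lhs => rw [hsplit]
        have : List.replicate (j + 1) c ++ rest.drop (j + 1) =
            c :: (List.replicate j c ++ rest.drop (j + 1)) := by
          simp [List.replicate_succ]
        rw [this]
        have step2 : loopA (c :: (List.replicate j c ++ rest.drop (j + 1))) (some c) false (tok ++ [c]) ss
            = loopA (List.replicate j c ++ rest.drop (j + 1)) (some c) true (tok ++ [c]) ss := by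
          simp [loopA]
        rw [step2, loopA_replicate_chk]
        rw [hBcons, if_pos (by omega)]
        cases hpe : rest.drop (j + 1) with
        | nil =>
          simp [loopA, finA, finB, runsOf_nil]
        | cons d post' =>
          have hdc : d ≠ c := by
            have := dropWhile_head_not (fun x => x == c) rest d post' (by rw [← hdropW]; exact hpe)
            simpa using this
          have step3 : loopA (d :: post') (some c) true (tok ++ [c]) ss
              = loopA post' (some d) false [d] (ss ++ [tok]) := by
            have : (tok ++ [c]).dropLast = tok := by simp
            simp [loopA, Ne.symm hdc, this]
          have step4 : loopA (d :: post') none false [] (ss ++ [tok])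
              = loopA post' (some d) false [d] (ss ++ [tok]) := by
            simp [loopA]
          rw [step3, ← step4]
          exact ih (d :: post') (by rw [← hpe]; exact hpostlen) none [] (ss ++ [tok]) (by simp)

theorem phase1_eq (cs : List Char) : phase1A cs = phase1B cs := by
  rw [phase1A_eq_finA, phase1B_eq_finB]
  exact main_inv cs.length cs le_rfl none [] [] (by simp)

theorem phase1B_ne_nil (cs : List Char) : phase1B cs ≠ [] := by
  simp [phase1B]

-- the middle loop of A collects exactly the nonempty tokens of ss[1:n-1]
theorem midA (ss : List (List Char)) (m : ℕ) :
    ∀ init : List (List Char), m + 1 ≤ ss.length →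
    (PySem.List.pyRange 1 (1 + (m : ℤ)) 1).foldl
      (fun ans i => if PySem.List.pyGetD ss i [] ≠ [] then ans ++ [PySem.List.pyGetD ss i []] else ans) init
    = init ++ ((ss.drop 1).take m).filter (fun t => t ≠ []) := by
  induction m with
  | zero =>
    intro init _
    norm_num [PySem.List.pyRange_one_eq_nil]
  | succ m ih =>
    intro init hm
    have hm' : m + 1 ≤ ss.length := by omega
    have hlt : m + 1 < ss.length := by omega
    rw [show (1 : ℤ) + ((m + 1 : ℕ) : ℤ) = (1 + ((m : ℕ) : ℤ)) + 1 by push_cast; ring]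
    rw [PySem.List.pyRange_one_succ_right (by omega), List.foldl_append, ih init hm']
    have hget : PySem.List.pyGetD ss (1 + ((m : ℕ) : ℤ)) [] = ss[m + 1] := by
      rw [show (1 : ℤ) + ((m : ℕ) : ℤ) = ((m + 1 : ℕ) : ℤ) by push_cast; ring,
        PySem.List.pyGetD_natCast]
      simp [List.getD_eq_getElem?_getD, List.getElem?_eq_getElem hlt]
    have htake : (ss.drop 1).take (m + 1) = (ss.drop 1).take m ++ [ss[m + 1]] := by
      rw [List.take_add_one]
      have h1 : (ss.drop 1)[m]? = some ss[m + 1] := by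
        rw [List.getElem?_drop, Nat.add_comm 1 m]
        exact List.getElem?_eq_getElem hlt
      simp [h1]
    simp only [List.foldl_cons, List.foldl_nil, hget, htake, List.filter_append]
    by_cases hne : ss[m + 1] = []
    · simp [hne]
    · simp [hne, List.append_assoc]

-- both post-processing passes agree on any nonempty ss
theorem tail_eq (ss : List (List Char)) (h : ss ≠ []) :
    (let n : Int := ss.length
     let ans := ([] : List (List Char)) ++ [PySem.List.pyGetD ss 0 []]
     let ans := (PySem.List.pyRange 1 (n - 1) 1).foldl
        (fun ans i => if PySem.List.pyGetD ss i [] ≠ [] then ans ++ [PySem.List.pyGetD ss i []] else ans) ans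
     if n > 1 then ans ++ [PySem.List.pyGetD ss (n - 1) []] else ans)
    = (if ss.length == 1 then ss
       else [PySem.List.pyGetD ss 0 []]
            ++ (PySem.List.slice ss (some 1) (some (-1))).filter (fun t => t ≠ [])
            ++ [PySem.List.pyGetD ss (-1) []]) := by
  have hlen1 : 1 ≤ ss.length := List.length_pos_iff.mpr h
  by_cases h1 : ss.length = 1
  · obtain ⟨x, hx⟩ := List.length_eq_one_iff.mp h1
    subst hx
    simp [PySem.List.pyRange_one_eq_nil, PySem.List.pyGetD]
  · have h2 : 2 ≤ ss.length := by omega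
    have hsp : ((ss.length : ℤ)) - 1 = 1 + ((ss.length - 2 : ℕ) : ℤ) := by omega
    simp only []
    rw [hsp, midA ss (ss.length - 2) _ (by omega), if_pos (by omega),
      if_neg (by simpa using h1)]
    have hlast : PySem.List.pyGetD ss (1 + ((ss.length - 2 : ℕ) : ℤ)) []
        = PySem.List.pyGetD ss (-1) [] := by
      rw [PySem.List.pyGetD_neg_one ss [] h]
      rw [show (1 + ((ss.length - 2 : ℕ) : ℤ)) = ((ss.length - 1 : ℕ) : ℤ) by omega,
        PySem.List.pyGetD_natCast, List.getLast_eq_getElem]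
      simp [List.getD_eq_getElem?_getD,
        List.getElem?_eq_getElem (by omega : ss.length - 1 < ss.length)]
    have hslice : PySem.List.slice ss (some 1) (some (-1)) = (ss.drop 1).take (ss.length - 2) := by
      simp [PySem.List.slice]
      rw [Nat.min_eq_left (by omega), List.drop_one]
      congr 1
    rw [hlast, hslice]
    simp

-- ===== VERDICT (by name: the statement is the Claim_ definition above) =====
theorem solution_spec : Claim_equal_solution := by
  intro s _
  unfold Spec_solution solution solution_alt
  rw [phase1_eq]
  exact congrArg (List.map String.ofList) (tail_eq (phase1B s.toList) (phase1B_ne_nil s.toList))
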